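-- pv_equiv track=rewrite | github.com/Sathwik-Chitla/binvalidator_project | app.py | compute_detection_summary
-- ===== SOURCE A (Python) =====
-- def compute_detection_summary(detected_asins, user_request):
--     """Return dict summary and total count."""
--     freq = {}
--     for a in detected_asins:
--         freq[a] = freq.get(a, 0) + 1
--
--     summary = {}
--     for asin, count in freq.items():
--         summary[asin] = {
--             "detections": int(count),
--             "quantity_per_item_requested": int(user_request.get(asin, 1))
--         }
--     total_detected = sum(freq.values())
--     return summary, total_detected
-- ===== SOURCE B (Python) =====
-- def compute_detection_summary(detected_asins, user_request):
--     """Return dict summary and total count (single pass, no intermediate freq dict)."""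
--     summary = {}
--     total_detected = 0
--     for a in detected_asins:
--         if a not in summary:
--             summary[a] = {
--                 "detections": 1,
--                 "quantity_per_item_requested": int(user_request.get(a, 1)),
--             }
--         else:
--             summary[a]["detections"] += 1
--         total_detected += 1
--     return summary, total_detected
-- ===== Notes on version B (the rewrite author's own statement) =====
-- stated objective: simpler
-- what changed: Replaced the two-pass count-then-build structure (intermediate freq dict, then a summary-building loop, then sum of freq values) by a single pass over detected_asins that builds the final summary directly, creating each entry on first sight and incrementing its detections thereafter, while accumulating the total in-loop.
import Mathlib
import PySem

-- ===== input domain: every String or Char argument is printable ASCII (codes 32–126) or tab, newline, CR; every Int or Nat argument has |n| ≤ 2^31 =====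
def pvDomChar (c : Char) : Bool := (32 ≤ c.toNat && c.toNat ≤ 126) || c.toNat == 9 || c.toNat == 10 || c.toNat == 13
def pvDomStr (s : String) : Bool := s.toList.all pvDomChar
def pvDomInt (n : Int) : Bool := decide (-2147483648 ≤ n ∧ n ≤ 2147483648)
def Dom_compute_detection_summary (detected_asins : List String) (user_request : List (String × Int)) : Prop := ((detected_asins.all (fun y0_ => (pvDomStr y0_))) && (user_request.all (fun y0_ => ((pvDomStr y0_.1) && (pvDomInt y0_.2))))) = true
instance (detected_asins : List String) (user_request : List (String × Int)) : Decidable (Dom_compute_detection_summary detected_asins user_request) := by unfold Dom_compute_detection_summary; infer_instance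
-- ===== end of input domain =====

-- B replaces A's two passes (count into freq, then build summary, then sum freq.values)
-- by one pass building the final summary directly and counting the total in-loop (objective: simpler).

-- ===== PORT A =====
def compute_detection_summary (detected_asins : List String) (user_request : List (String × Int)) : (List (String × List (String × Int))) × Int :=
  -- freq = {}; for a in detected_asins: freq[a] = freq.get(a, 0) + 1
  let freq : PySem.Dict String Int :=
    detected_asins.foldl (fun d a => d.insert a (d.getD a 0 + 1)) PySem.Dict.empty
  -- summary = {}; for asin, count in freq.items(): summary[asin] = {...}
  let summary : PySem.Dict String (PySem.Dict String Int) :=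
    freq.items.foldl (fun s p =>
      s.insert p.1 (PySem.Dict.mk
        [("detections", p.2),
         ("quantity_per_item_requested", (PySem.Dict.mk user_request).getD p.1 1)])) PySem.Dict.empty
  -- total_detected = sum(freq.values())
  let total_detected : Int := freq.values.sum
  (summary.items.map (fun p => (p.1, p.2.items)), total_detected)

-- ===== PORT B =====
def compute_detection_summary_alt (detected_asins : List String) (user_request : List (String × Int)) : (List (String × List (String × Int))) × Int :=
  -- summary = {}; total_detected = 0; one pass over detected_asins
  let st : PySem.Dict String (PySem.Dict String Int) × Int :=
    detected_asins.foldl (fun st a =>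
      let s := st.1
      let s' :=
        if s.contains a then
          -- summary[a]["detections"] += 1
          s.modify a PySem.Dict.empty (fun inner =>
            inner.insert "detections" (inner.getD "detections" 0 + 1))
        else
          -- summary[a] = {"detections": 1, "quantity_per_item_requested": int(user_request.get(a, 1))}
          s.insert a (PySem.Dict.mk
            [("detections", 1),
             ("quantity_per_item_requested", (PySem.Dict.mk user_request).getD a 1)])
      (s', st.2 + 1)) (PySem.Dict.empty, 0)
  (st.1.items.map (fun p => (p.1, p.2.items)), st.2)

-- ===== PRECONDITION & SPEC =====
def Spec_compute_detection_summary (detected_asins : List String) (user_request : List (String × Int)) (out : (List (String × List (String × Int))) × Int) : Prop := out = compute_detection_summary_alt detected_asins user_request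
instance (detected_asins : List String) (user_request : List (String × Int)) (out : (List (String × List (String × Int))) × Int) : Decidable (Spec_compute_detection_summary detected_asins user_request out) := by unfold Spec_compute_detection_summary; infer_instance

-- ===== CLAIM (what is proved, stated in full; the proofs are below) =====
def Claim_equal_compute_detection_summary : Prop := ∀ (detected_asins : List String) (user_request : List (String × Int)), Dom_compute_detection_summary detected_asins user_request → Spec_compute_detection_summary detected_asins user_request (compute_detection_summary detected_asins user_request)

-- ===== LEMMAS AND PROOFS =====

-- the summary entry built for key k with detection count c
def pvEntry (user_request : List (String × Int)) (c : Int) (k : String) : PySem.Dict String Int :=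
  PySem.Dict.mk [("detections", c), ("quantity_per_item_requested", (PySem.Dict.mk user_request).getD k 1)]

theorem pvEntry_bump (ur : List (String × Int)) (c : Int) (k : String) :
    (pvEntry ur c k).insert "detections" ((pvEntry ur c k).getD "detections" 0 + 1)
      = pvEntry ur (c + 1) k := by
  simp [pvEntry, PySem.Dict.insert, PySem.Dict.getD, PySem.Dict.get?, PySem.Dict.contains]

-- keys of the mapped items are the counter's keys
theorem pvContains_map (X : List (String × Int)) (f : String × Int → PySem.Dict String Int) (a : String) :
    (PySem.Dict.mk (X.map (fun p => (p.1, f p)))).contains a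
      = (PySem.Dict.mk X).contains a := by
  simp [PySem.Dict.contains, List.any_map, Function.comp_def]

-- B's fold state over l is exactly A's summary of l together with l.length
theorem pvFoldB (ur : List (String × Int)) (l : List String) :
    l.foldl (fun st a =>
      let s := st.1
      let s' :=
        if s.contains a then
          s.modify a PySem.Dict.empty (fun inner =>
            inner.insert "detections" (inner.getD "detections" 0 + 1))
        else
          s.insert a (PySem.Dict.mk
            [("detections", 1),
             ("quantity_per_item_requested", (PySem.Dict.mk ur).getD a 1)])
      (s', st.2 + 1)) (PySem.Dict.empty, 0)
    = (PySem.Dict.mk ((PySem.Dict.counter l).items.map (fun p => (p.1, pvEntry ur p.2 p.1))),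
       (l.length : Int)) := by
  induction l using List.reverseRecOn with
  | nil => rfl
  | append_singleton l a ih =>
      rw [List.foldl_append, ih]
      simp only [List.foldl_cons, List.foldl_nil]
      rw [PySem.Dict.counter_append_singleton]
      have hmk : PySem.Dict.mk (PySem.Dict.counter l).items = PySem.Dict.counter l := rfl
      have hlen : ((l ++ [a]).length : Int) = (l.length : Int) + 1 := by
        simp [List.length_append]
      rw [pvContains_map, hmk, hlen]
      by_cases hc : (PySem.Dict.counter l).contains a
      · -- a already counted: modify / replace-in-place on both sides
        simp only [hc, if_true]
        have hgd : (PySem.Dict.mk ((PySem.Dict.counter l).items.map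
            (fun p => (p.1, pvEntry ur p.2 p.1)))).getD a PySem.Dict.empty
              = pvEntry ur ((PySem.Dict.counter l).getD a 0) a := by
          obtain ⟨v, hv⟩ := Option.isSome_iff_exists.mp
            (by rw [← PySem.Dict.contains_eq_isSome_get? (PySem.Dict.counter l) a]; exact hc)
          have hm := PySem.Dict.mem_items_of_get?_eq_some (PySem.Dict.counter l) hv
          have hgv : (PySem.Dict.counter l).getD a 0 = v := by
            rw [PySem.Dict.getD_eq_get?_getD, hv]; rfl
          have hm' : (a, pvEntry ur v a) ∈ ((PySem.Dict.counter l).items.map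
              (fun p => (p.1, pvEntry ur p.2 p.1))) :=
            List.mem_map.mpr ⟨(a, v), hm, rfl⟩
          have hnd : (PySem.Dict.mk ((PySem.Dict.counter l).items.map
              (fun p => (p.1, pvEntry ur p.2 p.1)))).keys.Nodup := by
            simpa [PySem.Dict.keys, List.map_map, Function.comp_def]
              using PySem.Dict.nodup_keys_counter l
          rw [hgv]
          exact PySem.Dict.getD_of_mem_items _ hm' hnd _
        have hS : (PySem.Dict.mk ((PySem.Dict.counter l).items.map
              (fun p => (p.1, pvEntry ur p.2 p.1)))).modify a PySem.Dict.empty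
              (fun inner => inner.insert "detections" (inner.getD "detections" 0 + 1))
            = PySem.Dict.mk ((((PySem.Dict.counter l).modify a 0 (· + 1))).items.map
              (fun p => (p.1, pvEntry ur p.2 p.1))) := by
          apply PySem.Dict.ext
          simp only [PySem.Dict.modify]
          rw [hgd, pvEntry_bump]
          rw [PySem.Dict.items_insert, PySem.Dict.items_insert, pvContains_map, hmk]
          simp only [hc, if_true, List.map_map]
          apply List.map_congr_left
          intro p _
          by_cases hpa : p.1 = a
          · simp [hpa, pvEntry]
          · simp [hpa]
        rw [hS]
      · -- fresh key: append on both sides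
        simp only [hc, if_false, Bool.false_eq_true]
        have hgd0 : (PySem.Dict.counter l).getD a 0 = 0 :=
          PySem.Dict.getD_of_not_contains (PySem.Dict.counter l) 0 (by simpa using hc)
        have hS : (PySem.Dict.mk ((PySem.Dict.counter l).items.map
              (fun p => (p.1, pvEntry ur p.2 p.1)))).insert a (PySem.Dict.mk
                [("detections", 1),
                 ("quantity_per_item_requested", (PySem.Dict.mk ur).getD a 1)])
            = PySem.Dict.mk ((((PySem.Dict.counter l).modify a 0 (· + 1))).items.map
              (fun p => (p.1, pvEntry ur p.2 p.1))) := by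
          apply PySem.Dict.ext
          simp only [PySem.Dict.modify]
          rw [PySem.Dict.items_insert, PySem.Dict.items_insert, pvContains_map, hmk]
          simp [hc, hgd0, pvEntry]
        rw [hS]

-- sum of the counter's values is the length of the list
theorem pvSumCounter (l : List String) :
    (PySem.Dict.counter l).values.sum = (l.length : Int) := by
  have hperm : (PySem.Set.ofList l).Perm l.dedup := by
    refine (List.perm_ext_iff_of_nodup ?_ (List.nodup_dedup l)).mpr ?_
    · exact PySem.Set.nodup_ofList l
    · intro x; simp [PySem.Set.mem_ofList, List.mem_dedup]
  have h1 : (PySem.Dict.counter l).values.sum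
      = ((PySem.Set.ofList l).map (fun k => (l.count k : Int))).sum := by
    simp [PySem.Dict.values, PySem.Dict.items_counter, List.map_map, Function.comp_def]
  rw [h1]
  have h2 : ((PySem.Set.ofList l).map (fun k => (l.count k : Int))).sum
      = ((l.dedup).map (fun k => (l.count k : Int))).sum :=
    (hperm.map _).sum_eq
  rw [h2]
  have h3 : ((l.dedup).map (fun k => (l.count k : Int))).sum
      = (((l.dedup).map (fun k => l.count k)).sum : Int) := by
    rw [Nat.cast_list_sum, List.map_map]; rfl
  rw [h3, List.sum_map_count_dedup_eq_length]

-- A's summary-building fold appends the fresh distinct counter keys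
theorem pvSummaryA (ur : List (String × Int)) (l : List String) :
    ((PySem.Dict.counter l).items.foldl (fun s p =>
        s.insert p.1 (PySem.Dict.mk
          [("detections", p.2),
           ("quantity_per_item_requested", (PySem.Dict.mk ur).getD p.1 1)])) PySem.Dict.empty).items
      = (PySem.Dict.counter l).items.map (fun p => (p.1, pvEntry ur p.2 p.1)) := by
  have h := PySem.Dict.items_foldl_insert_fresh (l := (PySem.Dict.counter l).items)
    (k := Prod.fst)
    (v := fun p => PySem.Dict.mk
      [("detections", p.2),
       ("quantity_per_item_requested", (PySem.Dict.mk ur).getD p.1 1)])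
    (d := PySem.Dict.empty)
    (by intro p _; simp [PySem.Dict.contains_empty])
    (by have := PySem.Dict.nodup_keys_counter l; simpa [PySem.Dict.keys] using this)
  simpa [pvEntry, PySem.Dict.items] using h

-- ===== VERDICT (by name: the statement is the Claim_ definition above) =====
theorem compute_detection_summary_spec : Claim_equal_compute_detection_summary := by
  intro l ur _
  unfold Spec_compute_detection_summary compute_detection_summary compute_detection_summary_alt
  rw [PySem.Dict.foldl_insert_getD_add_one_eq_counter]
  rw [pvFoldB]
  simp only [pvSummaryA, pvSumCounter]
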